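-- pv_equiv track=rewrite | github.com/rauterfrank-ui/Peak_Trade | src/risk_layer/var_backtest/christoffersen_tests.py | _compute_transition_counts
-- ===== SOURCE A (Python) =====
-- from typing import Sequence
--
-- def _compute_transition_counts(exceedances: Sequence[bool]) -> tuple[int, int, int, int]:
--     """
--     Compute 2x2 transition matrix counts for exceedances.
--
--     Args:
--         exceedances: Boolean sequence
--
--     Returns:
--         Tuple (n00, n01, n10, n11) where:
--             n00 = # of (no violation → no violation)
--             n01 = # of (no violation → violation)
--             n10 = # of (violation → no violation)
--             n11 = # of (violation → violation)
--     """
--     n00 = n01 = n10 = n11 = 0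
--
--     for i in range(len(exceedances) - 1):
--         curr = exceedances[i]
--         next_val = exceedances[i + 1]
--
--         if not curr and not next_val:
--             n00 += 1
--         elif not curr and next_val:
--             n01 += 1
--         elif curr and not next_val:
--             n10 += 1
--         elif curr and next_val:
--             n11 += 1
--
--     return n00, n01, n10, n11
-- ===== SOURCE B (Python) =====
-- def _compute_transition_counts(exceedances):
--     """Derive the four transition counts by inclusion-exclusion from the total
--     number of True values, the boundary elements, and the number of maximal
--     True runs, instead of classifying each consecutive pair."""
--     bs = [bool(x) for x in exceedances]
--     n = len(bs)
--     if n == 0: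
--         return (0, 0, 0, 0)
--     t = sum(bs)
--     # number of maximal runs of consecutive True values
--     runs = sum(1 for i in range(n) if bs[i] and (i == 0 or not bs[i - 1]))
--     n11 = t - runs                 # a run of length L contributes L-1 True->True pairs
--     n10 = (t - bs[-1]) - n11       # True not at the end and not followed by True
--     n01 = (t - bs[0]) - n11        # True not at the start and not preceded by True
--     n00 = (n - 1) - n01 - n10 - n11
--     return (n00, n01, n10, n11)
-- ===== Notes on version B (the rewrite author's own statement) =====
-- stated objective: alternative
-- what changed: Replaces the per-pair four-way if/elif classification by inclusion-exclusion: B counts the True total and the number of maximal True runs, reads the boundary elements, and derives all four transition counts algebraically (n11 = trues - runs, n10/n01 from the marginals, n00 from the pair total).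
import Mathlib
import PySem

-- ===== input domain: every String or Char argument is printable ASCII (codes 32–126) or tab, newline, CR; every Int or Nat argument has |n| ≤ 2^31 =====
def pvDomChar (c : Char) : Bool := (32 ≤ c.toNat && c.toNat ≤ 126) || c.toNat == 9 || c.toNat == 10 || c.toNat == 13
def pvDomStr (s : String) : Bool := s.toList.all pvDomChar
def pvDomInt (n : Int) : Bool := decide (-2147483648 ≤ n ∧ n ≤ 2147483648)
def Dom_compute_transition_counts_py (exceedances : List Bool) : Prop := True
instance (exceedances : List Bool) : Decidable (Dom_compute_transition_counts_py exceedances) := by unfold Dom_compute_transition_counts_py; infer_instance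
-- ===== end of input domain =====

-- B derives all four transition counts by inclusion-exclusion from the True total, the
-- boundary elements and the number of maximal True runs, instead of classifying each
-- consecutive pair with a four-way if/elif (alternative decomposition, same O(n) cost).

-- ===== PORT A =====
def compute_transition_counts_py (exceedances : List Bool) : Int × Int × Int × Int :=
  -- n00 = n01 = n10 = n11 = 0; for i in range(len(exceedances) - 1): four-way if/elif
  (PySem.List.pyRange 0 ((exceedances.length : Int) - 1) 1).foldl
    (fun (s : Int × Int × Int × Int) i =>
      let curr := PySem.List.pyGetD exceedances i false
      let next_val := PySem.List.pyGetD exceedances (i + 1) false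
      let (n00, n01, n10, n11) := s
      if !curr && !next_val then (n00 + 1, n01, n10, n11)
      else if !curr && next_val then (n00, n01 + 1, n10, n11)
      else if curr && !next_val then (n00, n01, n10 + 1, n11)
      else if curr && next_val then (n00, n01, n10, n11 + 1)
      else (n00, n01, n10, n11))
    (0, 0, 0, 0)

-- ===== PORT B =====
def compute_transition_counts_py_alt (exceedances : List Bool) : Int × Int × Int × Int :=
  let bs := exceedances
  let n := bs.length
  if n = 0 then (0, 0, 0, 0)
  else
    -- t = sum(bs)
    let t : Int := (bs.count true : Int)
    -- runs = sum(1 for i in range(n) if bs[i] and (i == 0 or not bs[i-1]))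
    let runs : Int := (((List.range n).filter
        (fun i => bs.getD i false && (decide (i = 0) || !(bs.getD (i - 1) false)))).length : Int)
    let n11 := t - runs
    -- bs[-1] and bs[0]: n ≥ 1 here, so these are the last and first elements
    let n10 := (t - (if bs.getLastD false then 1 else 0)) - n11
    let n01 := (t - (if bs.headD false then 1 else 0)) - n11
    let n00 := ((n : Int) - 1) - n01 - n10 - n11
    (n00, n01, n10, n11)

-- ===== PRECONDITION & SPEC =====
def Spec_compute_transition_counts_py (exceedances : List Bool) (out : Int × Int × Int × Int) : Prop := out = compute_transition_counts_py_alt exceedances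
instance (exceedances : List Bool) (out : Int × Int × Int × Int) : Decidable (Spec_compute_transition_counts_py exceedances out) := by unfold Spec_compute_transition_counts_py; infer_instance

-- ===== CLAIM (what is proved, stated in full; the proofs are below) =====
def Claim_equal_compute_transition_counts_py : Prop := ∀ (exceedances : List Bool), Dom_compute_transition_counts_py exceedances → Spec_compute_transition_counts_py exceedances (compute_transition_counts_py exceedances)

-- ===== LEMMAS AND PROOFS =====

/-- The per-pair transition step of A's loop. -/
def pvStep (s : Int × Int × Int × Int) (p : Bool × Bool) : Int × Int × Int × Int :=
  let (n00, n01, n10, n11) := s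
  if !p.1 && !p.2 then (n00 + 1, n01, n10, n11)
  else if !p.1 && p.2 then (n00, n01 + 1, n10, n11)
  else if p.1 && !p.2 then (n00, n01, n10 + 1, n11)
  else if p.1 && p.2 then (n00, n01, n10, n11 + 1)
  else (n00, n01, n10, n11)

/-- The indexed consecutive pairs of A's loop are exactly `xs.zip xs.tail`. -/
lemma pvPairs_eq (xs : List Bool) :
    (List.range (xs.length - 1)).map
      (fun k => (xs.getD k false, xs.getD (k + 1) false)) = xs.zip xs.tail := by
  induction xs with
  | nil => simp
  | cons a l ih =>
    cases l with
    | nil => simp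
    | cons b t =>
      have h : (a :: b :: t).length - 1 = (b :: t).length - 1 + 1 := by
        simp only [List.length_cons]; omega
      have hmap :
          List.map ((fun k => ((a :: b :: t).getD k false, (a :: b :: t).getD (k + 1) false))
              ∘ Nat.succ) (List.range ((b :: t).length - 1)) =
            List.map (fun k => ((b :: t).getD k false, (b :: t).getD (k + 1) false))
              (List.range ((b :: t).length - 1)) := by
        apply List.map_congr_left
        intro k _
        simp [Function.comp]
      rw [h, List.range_succ_eq_map, List.map_cons, List.map_map, hmap, ih]
      simp

/-- Folding `pvStep` accumulates the four pair counts. -/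
lemma pvFold_count (ps : List (Bool × Bool)) :
    ∀ c00 c01 c10 c11 : Int,
      ps.foldl pvStep (c00, c01, c10, c11) =
        (c00 + List.count (false, false) ps, c01 + List.count (false, true) ps,
         c10 + List.count (true, false) ps, c11 + List.count (true, true) ps) := by
  induction ps with
  | nil => intro c00 c01 c10 c11; simp
  | cons p t ih =>
    intro c00 c01 c10 c11
    obtain ⟨x, y⟩ := p
    cases x <;> cases y <;>
      simp [pvStep, ih] <;> ring_nf

/-- A's range-indexed loop rewritten as a fold over the pair list. -/
lemma pvA_eq_fold (xs : List Bool) :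
    compute_transition_counts_py xs = (xs.zip xs.tail).foldl pvStep (0, 0, 0, 0) := by
  unfold compute_transition_counts_py
  rw [PySem.List.pyRange_one]
  have hn : (((xs.length : Int) - 1) - 0).toNat = xs.length - 1 := by omega
  rw [hn, List.foldl_map, ← pvPairs_eq xs, List.foldl_map]
  apply PySem.List.foldl_congr_mem
  intro s k hk
  have h2 : ((k : Int) + 1) = (((k + 1 : Nat)) : Int) := by push_cast; ring
  simp only [pvStep, zero_add, h2, PySem.List.pyGetD_natCast]

/-- Every True is followed by True, followed by False, or is last. -/
lemma pvL1 (xs : List Bool) :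
    xs.count true =
      List.count (true, true) (xs.zip xs.tail) + List.count (true, false) (xs.zip xs.tail)
        + (if xs.getLastD false then 1 else 0) := by
  induction xs with
  | nil => simp
  | cons a l ih =>
    cases l with
    | nil => cases a <;> simp
    | cons b t =>
      have hlast : (a :: b :: t).getLastD false = (b :: t).getLastD false := by simp
      simp only [List.tail_cons, List.zip_cons_cons, List.count_cons, hlast] at *
      cases a <;> cases b <;> simp at * <;> omega

/-- Every True is preceded by True, preceded by False, or is first. -/
lemma pvL2 (xs : List Bool) :
    xs.count true =
      List.count (true, true) (xs.zip xs.tail) + List.count (false, true) (xs.zip xs.tail)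
        + (if xs.headD false then 1 else 0) := by
  induction xs with
  | nil => simp
  | cons a l ih =>
    cases l with
    | nil => cases a <;> simp
    | cons b t =>
      simp only [List.tail_cons, List.zip_cons_cons, List.count_cons, List.headD_cons] at *
      cases a <;> cases b <;> simp at * <;> omega

/-- The run-start count of B equals head bit plus the (False,True) pair count. -/
lemma pvL3 (xs : List Bool) :
    ((List.range xs.length).filter
        (fun i => xs.getD i false && (decide (i = 0) || !(xs.getD (i - 1) false)))).length =
      (if xs.headD false then 1 else 0) + List.count (false, true) (xs.zip xs.tail) := by
  cases xs with
  | nil => simp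
  | cons a l =>
    have hcnt :
        List.count (false, true) ((a :: l).zip l) =
          List.countP
            (fun k => decide (((a :: l).getD k false, (a :: l).getD (k + 1) false) = (false, true)))
            (List.range l.length) := by
      have := pvPairs_eq (a :: l)
      simp only [List.length_cons, Nat.add_sub_cancel, List.tail_cons] at this
      rw [← this, List.count_eq_countP, List.countP_map]
      apply List.countP_congr
      intro k _
      simp
    rw [List.length_cons, ← List.countP_eq_length_filter, List.range_succ_eq_map,
      List.countP_cons, List.countP_map]
    have hstep :
        List.countP
          ((fun i => (a :: l).getD i false && (decide (i = 0) || !((a :: l).getD (i - 1) false)))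
            ∘ Nat.succ) (List.range l.length) =
          List.countP
            (fun k => decide (((a :: l).getD k false, (a :: l).getD (k + 1) false) = (false, true)))
            (List.range l.length) := by
      apply List.countP_congr
      intro k _
      simp only [Function.comp, List.getD_eq_getElem?_getD]
      cases h1 : (a :: l)[k]?.getD false <;> cases h2 : (a :: l)[k + 1]?.getD false <;>
        simp [h1, h2]
    rw [hstep, ← hcnt, List.tail_cons]
    cases a <;> simp <;> omega

/-- Each consecutive pair is one of the four kinds. -/
lemma pvL4 (ps : List (Bool × Bool)) :
    ps.length =
      List.count (false, false) ps + List.count (false, true) ps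
        + List.count (true, false) ps + List.count (true, true) ps := by
  induction ps with
  | nil => simp
  | cons p t ih =>
    obtain ⟨x, y⟩ := p
    cases x <;> cases y <;> simp [List.count_cons, ih] <;> omega

lemma pvZipLen (xs : List Bool) : (xs.zip xs.tail).length = xs.length - 1 := by
  cases xs <;> simp [List.length_zip]

-- ===== VERDICT (by name: the statement is the Claim_ definition above) =====
theorem compute_transition_counts_py_spec : Claim_equal_compute_transition_counts_py := by
  intro xs _
  unfold Spec_compute_transition_counts_py
  rw [pvA_eq_fold, pvFold_count]
  unfold compute_transition_counts_py_alt
  cases xs with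
  | nil => simp
  | cons a l =>
    have h1 := pvL1 (a :: l)
    have h2 := pvL2 (a :: l)
    have h3 := pvL3 (a :: l)
    have h4 := pvL4 ((a :: l).zip ((a :: l).tail))
    have hz := pvZipLen (a :: l)
    simp only [List.tail_cons, List.length_cons] at h1 h2 h3 h4 hz
    simp only [List.length_cons, if_neg (Nat.succ_ne_zero l.length), List.tail_cons, h3]
    simp only [Prod.mk.injEq]
    cases a <;>
      simp only [List.headD_cons, reduceIte] at h1 h2 h3 ⊢ <;>
      refine ⟨?_, ?_, ?_, ?_⟩ <;> split_ifs at * <;> push_cast at * <;> omega
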